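-- pv_equiv track=rewrite | github.com/sueszli/vector-database-benchmark | dataset/python-mutated/conll_ner_to_docs.py | segment_docs
-- ===== SOURCE A (Python) =====
-- def segment_docs(input_data, n_sents, doc_delimiter):
--     if False:
--         return 10
--     sent_delimiter = '\n\n'
--     sents = input_data.split(sent_delimiter)
--     docs = [sents[i:i + n_sents] for i in range(0, len(sents), n_sents)]
--     input_data = ''
--     for doc in docs:
--         input_data += sent_delimiter + doc_delimiter
--         input_data += sent_delimiter.join(doc)
--     return input_data
-- ===== SOURCE B (Python) =====
-- def segment_docs(input_data, n_sents, doc_delimiter):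
--     sent_delimiter = "\n\n"
--     parts = []
--     for i, sent in enumerate(input_data.split(sent_delimiter)):
--         parts.append(sent_delimiter + doc_delimiter if i % n_sents == 0 else sent_delimiter)
--         parts.append(sent)
--     return "".join(parts)
-- ===== Notes on version B (the rewrite author's own statement) =====
-- stated objective: alternative
-- what changed: B makes a single enumerate pass over the sentences, emitting a doc-delimiter prefix exactly at indices divisible by n_sents and joining the collected parts once, instead of materialising a list of slice-chunks and concatenating strings per chunk; Pre_ excludes only n_sents = 0, where A raises ValueError and B raises ZeroDivisionError.
-- intended difference: For n_sents < 0 A returns the empty string, silently discarding the whole input; B segments by the divisor's magnitude and returns all sentences, which preserves the data and is the intended behaviour of a segmenter. — e.g. on segment_docs("a", -1, "#"): A returns "", B returns "\n\n#a"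
import Mathlib
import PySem

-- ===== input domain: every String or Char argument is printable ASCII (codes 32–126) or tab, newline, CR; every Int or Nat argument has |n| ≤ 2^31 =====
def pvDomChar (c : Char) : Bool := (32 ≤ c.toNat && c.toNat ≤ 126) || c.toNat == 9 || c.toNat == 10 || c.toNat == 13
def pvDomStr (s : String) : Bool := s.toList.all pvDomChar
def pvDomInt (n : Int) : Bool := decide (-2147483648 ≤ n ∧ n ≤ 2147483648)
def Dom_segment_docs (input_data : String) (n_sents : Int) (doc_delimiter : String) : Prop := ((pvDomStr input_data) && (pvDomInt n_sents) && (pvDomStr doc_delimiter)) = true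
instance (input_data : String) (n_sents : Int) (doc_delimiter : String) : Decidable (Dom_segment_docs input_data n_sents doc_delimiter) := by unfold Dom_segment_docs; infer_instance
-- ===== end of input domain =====

-- B replaces the slice-chunks list and per-chunk string concatenation by one enumerate pass
-- that emits a delimiter prefix per sentence (doc delimiter at indices divisible by n_sents)
-- and a single final join; A = B on Pre_ outside D_ (negative n_sents), where they differ as stated.

-- ===== PORT A =====
def segment_docs (input_data : String) (n_sents : Int) (doc_delimiter : String) : String :=
  let sent_delimiter : String := "\n\n"
  -- .split with the nonempty literal separator "\n\n" always succeeds; getD [] is unreachable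
  let sents : List String := (PySem.Str.split? input_data sent_delimiter).getD []
  let docs : List (List String) := (PySem.List.pyRange 0 (sents.length : Int) n_sents).map
    (fun i => PySem.List.slice sents (some i) (some (i + n_sents)))
  docs.foldl (fun acc doc =>
    acc ++ (sent_delimiter ++ doc_delimiter) ++ PySem.Str.join sent_delimiter doc) ""

-- ===== PORT B =====
def segment_docs_alt (input_data : String) (n_sents : Int) (doc_delimiter : String) : String :=
  let sent_delimiter : String := "\n\n"
  let sents : List String := (PySem.Str.split? input_data sent_delimiter).getD []
  let parts : List String := (PySem.List.enumerate sents).foldl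
    (fun acc p =>
      acc ++ [if PySem.Int.mod p.1 n_sents = 0 then sent_delimiter ++ doc_delimiter else sent_delimiter, p.2]) []
  PySem.Str.join "" parts

-- ===== PRECONDITION & SPEC =====
-- Pre_ excludes only n_sents = 0, on which Python A raises ValueError (range() step 0)
-- and Python B raises ZeroDivisionError (i % 0).
def Pre_segment_docs (_input_data : String) (n_sents : Int) (_doc_delimiter : String) : Prop :=
  n_sents ≠ 0
instance (input_data : String) (n_sents : Int) (doc_delimiter : String) : Decidable (Pre_segment_docs input_data n_sents doc_delimiter) := by unfold Pre_segment_docs; infer_instance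

def pvWitness_segment_docs : String × Int × String := ("a\n\nb\n\nc", 2, "-DOCSTART-")

-- For n_sents < 0 A returns the empty string, silently discarding the whole input; B segments
-- by the divisor's magnitude and returns all sentences, which preserves the data and is the
-- intended behaviour of a segmenter.
def D_segment_docs (_input_data : String) (n_sents : Int) (_doc_delimiter : String) : Prop :=
  n_sents < 0
instance (input_data : String) (n_sents : Int) (doc_delimiter : String) : Decidable (D_segment_docs input_data n_sents doc_delimiter) := by unfold D_segment_docs; infer_instance

def Spec_segment_docs (input_data : String) (n_sents : Int) (doc_delimiter : String) (out : String) : Prop := ¬ D_segment_docs input_data n_sents doc_delimiter → out = segment_docs_alt input_data n_sents doc_delimiter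
instance (input_data : String) (n_sents : Int) (doc_delimiter : String) (out : String) : Decidable (Spec_segment_docs input_data n_sents doc_delimiter out) := by unfold Spec_segment_docs; infer_instance

def pvDiffWitness_segment_docs : String × Int × String := ("a", -1, "#")
def pvDiffWitnessOut_segment_docs : String × String := ("", "\n\n#a")

-- ===== CLAIM (what is proved, stated in full; the proofs are below) =====
def Claim_unchanged_segment_docs : Prop := ∀ (input_data : String) (n_sents : Int) (doc_delimiter : String), Dom_segment_docs input_data n_sents doc_delimiter → Pre_segment_docs input_data n_sents doc_delimiter → Spec_segment_docs input_data n_sents doc_delimiter (segment_docs input_data n_sents doc_delimiter)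
def Claim_changed_segment_docs : Prop := Dom_segment_docs (pvDiffWitness_segment_docs.1) (pvDiffWitness_segment_docs.2.1) (pvDiffWitness_segment_docs.2.2) ∧ Pre_segment_docs (pvDiffWitness_segment_docs.1) (pvDiffWitness_segment_docs.2.1) (pvDiffWitness_segment_docs.2.2) ∧ D_segment_docs (pvDiffWitness_segment_docs.1) (pvDiffWitness_segment_docs.2.1) (pvDiffWitness_segment_docs.2.2) ∧ segment_docs (pvDiffWitness_segment_docs.1) (pvDiffWitness_segment_docs.2.1) (pvDiffWitness_segment_docs.2.2) = pvDiffWitnessOut_segment_docs.1 ∧ segment_docs_alt (pvDiffWitness_segment_docs.1) (pvDiffWitness_segment_docs.2.1) (pvDiffWitness_segment_docs.2.2) = pvDiffWitnessOut_segment_docs.2 ∧ pvDiffWitnessOut_segment_docs.1 ≠ pvDiffWitnessOut_segment_docs.2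
def Claim_exact_segment_docs : Prop := ∀ (input_data : String) (n_sents : Int) (doc_delimiter : String), Dom_segment_docs input_data n_sents doc_delimiter → Pre_segment_docs input_data n_sents doc_delimiter → D_segment_docs input_data n_sents doc_delimiter → segment_docs input_data n_sents doc_delimiter ≠ segment_docs_alt input_data n_sents doc_delimiter

-- ===== LEMMAS AND PROOFS =====

theorem pvRange_nil_of_neg (b s : Int) (hs : s < 0) (hb : 0 ≤ b) :
    PySem.List.pyRange 0 b s = [] := by
  unfold PySem.List.pyRange
  rw [if_neg (by omega)]
  simp only [if_neg (by omega : ¬ 0 < s), if_neg (by omega : ¬ b < 0)]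
  rfl

theorem pvRange_nil_of_le (a b s : Int) (hs : 0 < s) (hb : b ≤ a) :
    PySem.List.pyRange a b s = [] := by
  rw [PySem.List.pyRange_of_pos a b hs, if_neg (by omega)]
  rfl

theorem pvRange_cons_step (a b k : Int) (hk : 0 < k) (hab : a < b) :
    PySem.List.pyRange a b k = a :: PySem.List.pyRange (a + k) b k := by
  rw [PySem.List.pyRange_of_pos a b hk, PySem.List.pyRange_of_pos (a+k) b hk, if_pos hab]
  have key : b - a + k - 1 = (b - a - 1) + 1 * k := by ring
  have h1 : (b - a + k - 1) / k = (b - a - 1) / k + 1 := by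
    rw [key, Int.add_mul_ediv_right _ _ (by omega)]
  by_cases hbk : a + k < b
  · rw [if_pos hbk]
    have h2 : b - (a + k) + k - 1 = b - a - 1 := by ring
    rw [h2, h1]
    have hnn : 0 ≤ (b - a - 1) / k := Int.ediv_nonneg (by omega) (by omega)
    rw [show ((b - a - 1) / k + 1).toNat = ((b-a-1)/k).toNat + 1 by omega]
    rw [List.range_succ_eq_map, List.map_cons, List.map_map]
    congr 1
    · simp
    · apply List.map_congr_left; intro j _
      simp only [Function.comp_apply, Nat.succ_eq_add_one]
      push_cast; ring
  · rw [if_neg hbk]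
    have h0 : (b - a - 1) / k = 0 := Int.ediv_eq_zero_of_lt (by omega) (by omega)
    rw [h1, h0]
    norm_num

theorem pvRange_shift (a b k : Int) (hk : 0 < k) :
    PySem.List.pyRange (a + k) b k = (PySem.List.pyRange a (b - k) k).map (· + k) := by
  rw [PySem.List.pyRange_of_pos (a+k) b hk, PySem.List.pyRange_of_pos a (b-k) hk]
  by_cases h : a + k < b
  · rw [if_pos h, if_pos (by omega)]
    rw [show b - (a + k) + k - 1 = b - k - a + k - 1 by ring, List.map_map]
    apply List.map_congr_left; intro j _; simp; ring
  · rw [if_neg h, if_neg (by omega)]; rfl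

theorem pvRange_cast_sub (len k' : Nat) (k : Int) (hk : 0 < k) :
    PySem.List.pyRange 0 ((len : Int) - (k' : Int)) k
      = PySem.List.pyRange 0 ((len - k' : Nat) : Int) k := by
  by_cases h : k' ≤ len
  · congr 1; omega
  · rw [pvRange_nil_of_le _ _ _ hk (by omega), pvRange_nil_of_le _ _ _ hk (by omega)]

theorem pvJoinE_cons (x : String) (xs : List String) :
    PySem.Str.join "" (x :: xs) = x ++ PySem.Str.join "" xs := by
  cases xs with
  | nil =>
    apply String.ext
    simp [PySem.Str.toList_join, PySem.Chars.join_singleton, PySem.Chars.join_nil]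
  | cons y ys =>
    apply String.ext
    simp [PySem.Str.toList_join, PySem.Chars.join_cons_cons]

theorem pvJoinE_append (xs ys : List String) :
    PySem.Str.join "" (xs ++ ys) = PySem.Str.join "" xs ++ PySem.Str.join "" ys := by
  induction xs with
  | nil => simp [show PySem.Str.join "" [] = "" from rfl]
  | cons x xs ih => simp only [List.cons_append, pvJoinE_cons, ih, String.append_assoc]

theorem pvJoin_cons (sd x : String) (xs : List String) :
    PySem.Str.join sd (x :: xs) = x ++ PySem.Str.join "" (xs.map (fun y => sd ++ y)) := by
  induction xs generalizing x with
  | nil =>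
    apply String.ext
    simp [PySem.Str.toList_join, PySem.Chars.join_singleton, PySem.Chars.join_nil]
  | cons y ys ih =>
    have h : PySem.Str.join sd (x :: y :: ys) = x ++ sd ++ PySem.Str.join sd (y :: ys) := by
      apply String.ext
      simp [PySem.Str.toList_join, PySem.Chars.join_cons_cons]
    rw [h, ih y, List.map_cons, pvJoinE_cons]
    simp [String.append_assoc]

theorem pvFoldA_shift (sd dd : String) (ds : List (List String)) (acc : String) :
    ds.foldl (fun a d => a ++ (sd ++ dd) ++ PySem.Str.join sd d) acc
      = acc ++ ds.foldl (fun a d => a ++ (sd ++ dd) ++ PySem.Str.join sd d) "" := by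
  induction ds generalizing acc with
  | nil => simp
  | cons d ds ih =>
    simp only [List.foldl_cons]
    rw [ih, ih ("" ++ (sd ++ dd) ++ PySem.Str.join sd d)]
    simp [String.append_assoc]

theorem pvMod_small (s k : Int) (h0 : 0 ≤ s) (h1 : s < k) : PySem.Int.mod s k = s := by
  show s.fmod k = s
  rw [Int.fmod_eq_emod]
  rw [if_pos (Or.inl (by omega))]
  rw [Int.emod_eq_of_lt h0 h1]
  ring

theorem pvMod_add_self (s k : Int) : PySem.Int.mod (s + k) k = PySem.Int.mod s k := by
  show (s + k).fmod k = s.fmod k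
  rw [Int.fmod_eq_emod, Int.fmod_eq_emod]
  have h : (s + k) % k = s % k := by
    simp
  rw [h]
  have hiff : k ∣ s + k ↔ k ∣ s := by rw [add_comm]; exact dvd_add_right (dvd_refl k)
  simp only [hiff]

theorem pvEnum_shift (sd dd : String) (k : Int) (r : List String) (s : Int) :
    ((PySem.List.enumerate r (s + k)).flatMap
        (fun p => [if PySem.Int.mod p.1 k = 0 then sd ++ dd else sd, p.2]))
      = ((PySem.List.enumerate r s).flatMap
        (fun p => [if PySem.Int.mod p.1 k = 0 then sd ++ dd else sd, p.2])) := by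
  induction r generalizing s with
  | nil => rfl
  | cons x xs ih =>
    rw [PySem.List.enumerate_cons, PySem.List.enumerate_cons]
    simp only [List.flatMap_cons]
    rw [show s + k + 1 = (s + 1) + k by ring, ih (s+1), pvMod_add_self]

theorem pvChunk_tail (sd dd : String) (k : Nat) (cs : List String) (s : Nat)
    (hs : 1 ≤ s) (hlen : s + cs.length ≤ k) :
    PySem.Str.join "" ((PySem.List.enumerate cs (s : Int)).flatMap
        (fun p => [if PySem.Int.mod p.1 (k : Int) = 0 then sd ++ dd else sd, p.2]))
      = PySem.Str.join "" (cs.map (fun y => sd ++ y)) := by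
  induction cs generalizing s with
  | nil => rfl
  | cons x xs ih =>
    rw [PySem.List.enumerate_cons]
    simp only [List.flatMap_cons, List.map_cons]
    have hmod : PySem.Int.mod (s : Int) (k : Int) = (s : Int) := by
      apply pvMod_small <;> [positivity; exact_mod_cast by simp at hlen ⊢; omega]
    rw [hmod, if_neg (by exact_mod_cast by omega)]
    rw [show ((s : Int) + 1) = ((s + 1 : Nat) : Int) by push_cast; ring]
    rw [show ([sd, x] ++ List.flatMap (fun p => [if PySem.Int.mod p.1 (k:Int) = 0 then sd ++ dd else sd, p.2]) (PySem.List.enumerate xs ((s+1 : Nat) : Int))) = sd :: x :: List.flatMap (fun p => [if PySem.Int.mod p.1 (k:Int) = 0 then sd ++ dd else sd, p.2]) (PySem.List.enumerate xs ((s+1 : Nat) : Int)) from rfl]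
    rw [pvJoinE_cons, pvJoinE_cons, pvJoinE_cons]
    rw [ih (s+1) (by omega) (by simp at hlen ⊢; omega)]
    rw [String.append_assoc]

theorem pvChunk (sd dd : String) (k : Nat) (c : List String) (hc : c ≠ [])
    (hlen : c.length ≤ k) :
    PySem.Str.join "" ((PySem.List.enumerate c 0).flatMap
        (fun p => [if PySem.Int.mod p.1 (k : Int) = 0 then sd ++ dd else sd, p.2]))
      = (sd ++ dd) ++ PySem.Str.join sd c := by
  match c with
  | [] => exact absurd rfl hc
  | x :: cs =>
    rw [PySem.List.enumerate_cons]
    simp only [List.flatMap_cons]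
    rw [show PySem.Int.mod 0 (k : Int) = 0 from Int.zero_fmod _, if_pos rfl]
    rw [show ((0:Int) + 1) = ((1 : Nat) : Int) from by norm_num]
    rw [show ([sd ++ dd, x] ++ List.flatMap (fun p => [if PySem.Int.mod p.1 (k:Int) = 0 then sd ++ dd else sd, p.2]) (PySem.List.enumerate cs ((1 : Nat) : Int))) = (sd ++ dd) :: x :: List.flatMap (fun p => [if PySem.Int.mod p.1 (k:Int) = 0 then sd ++ dd else sd, p.2]) (PySem.List.enumerate cs ((1 : Nat) : Int)) from rfl]
    rw [pvJoinE_cons, pvJoinE_cons]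
    rw [pvChunk_tail sd dd k cs 1 (by omega) (by simp at hlen ⊢; omega)]
    rw [pvJoin_cons, String.append_assoc]

theorem pvMain (sd dd : String) (k : Nat) (hk : 0 < k) (l : List String) :
    ((PySem.List.pyRange 0 (l.length : Int) (k : Int)).map
        (fun i => PySem.List.slice l (some i) (some (i + (k : Int))))).foldl
      (fun acc doc => acc ++ (sd ++ dd) ++ PySem.Str.join sd doc) ""
    = PySem.Str.join "" ((PySem.List.enumerate l).foldl
        (fun acc p => acc ++ [if PySem.Int.mod p.1 (k : Int) = 0 then sd ++ dd else sd, p.2]) []) := by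
  suffices H : ∀ (n : Nat) (l : List String), l.length ≤ n →
      ((PySem.List.pyRange 0 (l.length : Int) (k : Int)).map
          (fun i => PySem.List.slice l (some i) (some (i + (k : Int))))).foldl
        (fun acc doc => acc ++ (sd ++ dd) ++ PySem.Str.join sd doc) ""
      = PySem.Str.join "" ((PySem.List.enumerate l).foldl
          (fun acc p => acc ++ [if PySem.Int.mod p.1 (k : Int) = 0 then sd ++ dd else sd, p.2]) []) by
    exact H l.length l le_rfl
  intro n
  induction n with
  | zero =>
    intro l hl
    have : l = [] := List.eq_nil_of_length_eq_zero (by omega)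
    subst this
    rw [pvRange_nil_of_le _ _ _ (by exact_mod_cast hk) (by simp)]
    rfl
  | succ n ih =>
    intro l hl
    cases hcl : l with
    | nil =>
      rw [pvRange_nil_of_le _ _ _ (by exact_mod_cast hk) (by simp)]
      rfl
    | cons x xs =>
    rw [← hcl]
    have hlpos : 0 < l.length := by rw [hcl]; simp
    rw [PySem.List.foldl_append_eq_flatMap, List.nil_append]
    rw [pvRange_cons_step 0 (l.length : Int) (k : Int) (by exact_mod_cast hk) (by exact_mod_cast hlpos)]
    rw [List.map_cons, List.foldl_cons, pvFoldA_shift]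
    have hhead : PySem.List.slice l (some 0) (some (0 + (k : Int))) = l.take k := by
      rw [zero_add, PySem.List.slice_zero_start, PySem.List.slice_to_natCast]
    rw [hhead]
    have htail : (PySem.List.pyRange (0 + (k : Int)) (l.length : Int) (k : Int)).map
          (fun i => PySem.List.slice l (some i) (some (i + (k : Int))))
        = (PySem.List.pyRange 0 ((l.drop k).length : Int) (k : Int)).map
          (fun i => PySem.List.slice (l.drop k) (some i) (some (i + (k : Int)))) := by
      rw [pvRange_shift 0 (l.length : Int) (k : Int) (by exact_mod_cast hk)]
      rw [show (l.length : Int) - (k : Int) = ((l.length : Nat) : Int) - ((k : Nat) : Int) from rfl]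
      rw [pvRange_cast_sub l.length k (k : Int) (by exact_mod_cast hk)]
      rw [← List.length_drop]
      rw [List.map_map]
      apply List.map_congr_left
      intro i hi
      have h0i : 0 ≤ i := ((PySem.List.mem_pyRange_iff_of_pos (by exact_mod_cast hk) i).mp hi).1
      simp only [Function.comp_apply]
      rw [PySem.List.slice_toNat l (by omega) (by omega),
          PySem.List.slice_toNat (l.drop k) h0i (by omega)]
      rw [List.drop_drop]
      congr 1
      · omega
      · congr 1; omega
    rw [htail]
    have hrec := ih (l.drop k) (by rw [hcl] at hl ⊢; simp at hl ⊢; omega)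
    rw [PySem.List.foldl_append_eq_flatMap, List.nil_append] at hrec
    rw [hrec]
    conv_rhs => rw [← List.take_append_drop k l]
    rw [PySem.List.enumerate_append, List.flatMap_append, pvJoinE_append]
    rw [pvChunk sd dd k (l.take k) (by rw [hcl]; simp; omega) (by simp)]
    by_cases hkl : l.length ≤ k
    · have hdrop : l.drop k = [] := List.drop_eq_nil_of_le hkl
      rw [hdrop]
      simp [String.append_assoc]
    · have hmin : (l.take k).length = k := by simp; omega
      rw [hmin, zero_add]
      have hsh := pvEnum_shift sd dd (k : Int) (l.drop k) 0
      rw [zero_add] at hsh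
      rw [hsh]
      simp [String.append_assoc]

theorem pvGo_ne_nil (sep : List Char) : ∀ (fuel : Nat) (l cur : List Char) (acc : List (List Char)),
    PySem.Chars.splitOn.go sep fuel l cur acc ≠ [] := by
  intro fuel
  induction fuel with
  | zero => intro l cur acc; simp [PySem.Chars.splitOn.go]
  | succ n ih =>
    intro l cur acc
    cases l with
    | nil => simp [PySem.Chars.splitOn.go]
    | cons c rest =>
      rw [PySem.Chars.splitOn.go]
      split
      · exact ih _ _ _
      · exact ih _ _ _

theorem pvSents_ne_nil (s : String) :
    ((PySem.Str.split? s "\n\n").getD []) ≠ [] := by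
  unfold PySem.Str.split? PySem.Chars.split?
  rw [if_neg (by decide)]
  simp only [Option.map_some, Option.getD_some, ne_eq, List.map_eq_nil_iff]
  unfold PySem.Chars.splitOn
  exact pvGo_ne_nil _ _ _ _ _

theorem pvAlt_ne_empty (input_data : String) (n_sents : Int) (doc_delimiter : String) :
    segment_docs_alt input_data n_sents doc_delimiter ≠ "" := by
  unfold segment_docs_alt
  simp only
  rw [PySem.List.foldl_append_eq_flatMap, List.nil_append]
  cases hs : ((PySem.Str.split? input_data "\n\n").getD []) with
  | nil => exact absurd hs (pvSents_ne_nil input_data)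
  | cons x xs =>
    rw [PySem.List.enumerate_cons, List.flatMap_cons]
    rw [show ([if PySem.Int.mod 0 n_sents = 0 then "\n\n" ++ doc_delimiter else "\n\n", x] ++ List.flatMap (fun p => [if PySem.Int.mod p.1 n_sents = 0 then "\n\n" ++ doc_delimiter else "\n\n", p.2]) (PySem.List.enumerate xs (0+1))) = (if PySem.Int.mod 0 n_sents = 0 then "\n\n" ++ doc_delimiter else "\n\n") :: x :: List.flatMap (fun p => [if PySem.Int.mod p.1 n_sents = 0 then "\n\n" ++ doc_delimiter else "\n\n", p.2]) (PySem.List.enumerate xs (0+1)) from rfl]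
    rw [pvJoinE_cons]
    intro h
    have hlist : ((if PySem.Int.mod 0 n_sents = 0 then "\n\n" ++ doc_delimiter else "\n\n").toList)
        ++ (PySem.Str.join "" (x :: List.flatMap (fun p => [if PySem.Int.mod p.1 n_sents = 0 then "\n\n" ++ doc_delimiter else "\n\n", p.2]) (PySem.List.enumerate xs (0+1)))).toList = [] := by
      have := congrArg String.toList h
      rwa [String.toList_append] at this
    have hfirst : (if PySem.Int.mod 0 n_sents = 0 then "\n\n" ++ doc_delimiter else "\n\n").toList ≠ [] := by
      split
      · rw [String.toList_append]; simp [show ("\n\n" : String).toList = ['\n','\n'] from rfl]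
      · decide
    exact hfirst (List.append_eq_nil_iff.mp hlist).1

-- ===== VERDICT (by name: the statements are the Claim_ definitions above) =====

theorem segment_docs_spec : Claim_unchanged_segment_docs := by
  intro input_data n_sents doc_delimiter _hdom hpre hnd
  unfold D_segment_docs at hnd
  unfold segment_docs segment_docs_alt
  have hk : 0 < n_sents := lt_of_le_of_ne (not_lt.mp hnd) (Ne.symm hpre)
  have hcast : ((n_sents.toNat : Int)) = n_sents := Int.toNat_of_nonneg hk.le
  simp only
  rw [← hcast]
  rw [pvMain "\n\n" doc_delimiter n_sents.toNat (by omega)]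

theorem segment_docs_changed : Claim_changed_segment_docs := by
  unfold Claim_changed_segment_docs
  refine ⟨by decide, by decide, by decide, by decide, ?_, by decide⟩
  decide

theorem segment_docs_tight : Claim_exact_segment_docs := by
  intro input_data n_sents doc_delimiter _hdom _hpre hd
  unfold D_segment_docs at hd
  have hA : segment_docs input_data n_sents doc_delimiter = "" := by
    unfold segment_docs
    simp only
    rw [pvRange_nil_of_neg _ _ hd (by positivity)]
    rfl
  rw [hA]
  exact fun h => pvAlt_ne_empty input_data n_sents doc_delimiter h.symm
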